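-- pv_equiv track=rewrite | github.com/MrBrantCode/unitest_baseline | mut_generate/mist_train_cf/cf_71153/solution.py | reverse_and_count_consonants
-- ===== SOURCE A (Python) =====
-- def reverse_and_count_consonants(s):
--     """
--     Reverses the input string using a stack without any built-in reverse functions and returns the reversed string along with the count of consonants in the reversed string.
--
--     Args:
--         s (str): The input string.
--
--     Returns:
--         tuple: A tuple containing the reversed string and the count of consonants in the reversed string.
--     """
--     class Stack:
--         def __init__(self):
--             self.stack = []
--
--         def push(self, item):
--             self.stack.append(item)
--
--         def pop(self):
--             return self.stack.pop()
--
--         def is_empty(self):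
--             return len(self.stack) == 0
--
--
--     stack = Stack()
--     for char in s:
--         stack.push(char)
--
--     reverse = ''
--     while not stack.is_empty():
--         reverse += stack.pop()
--
--     consonant_count = len([char for char in reverse if char.lower() in 'bcdfghjklmnpqrstvwxyz'])
--
--     return reverse, consonant_count
-- ===== SOURCE B (Python) =====
-- def reverse_and_count_consonants(s):
--     reverse = s[::-1]
--     consonant_count = sum(1 for c in reverse if c.lower() in 'bcdfghjklmnpqrstvwxyz')
--     return reverse, consonant_count
-- ===== Notes on version B (the rewrite author's own statement) =====
-- stated objective: simpler
-- what changed: Replaces the explicit Stack class push/pop loops and the list-comprehension count with a single slice reversal and a one-pass generator sum.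
import Mathlib
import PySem

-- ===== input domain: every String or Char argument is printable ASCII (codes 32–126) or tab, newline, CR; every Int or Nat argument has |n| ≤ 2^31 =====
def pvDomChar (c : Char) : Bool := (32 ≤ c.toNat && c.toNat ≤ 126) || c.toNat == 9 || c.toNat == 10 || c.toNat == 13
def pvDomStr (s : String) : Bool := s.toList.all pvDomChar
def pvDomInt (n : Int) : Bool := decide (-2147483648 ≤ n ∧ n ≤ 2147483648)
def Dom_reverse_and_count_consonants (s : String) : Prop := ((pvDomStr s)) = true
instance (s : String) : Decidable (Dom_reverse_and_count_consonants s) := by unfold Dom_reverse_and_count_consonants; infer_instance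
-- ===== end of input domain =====

-- B replaces A's Stack-class push/pop reversal and list-comprehension count with a
-- slice reversal and a one-pass generator sum (objective: simpler).

-- ===== PORT A =====
-- the 'while not stack.is_empty(): reverse += stack.pop()' loop: pop takes the last element
def pvDrain (stack : List Char) (reverse : List Char) : List Char :=
  if h : stack = [] then reverse
  else pvDrain stack.dropLast (reverse ++ [stack.getLast h])
termination_by stack.length
decreasing_by
  have : stack.length ≠ 0 := fun hl => h (List.eq_nil_of_length_eq_zero hl)
  simp [List.length_dropLast]; omega

def reverse_and_count_consonants (s : String) : String × Int :=
  let stack := s.toList.foldl (fun st c => st ++ [c]) []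
  let rev := pvDrain stack []
  let cnt := (rev.filter
    (fun c => "bcdfghjklmnpqrstvwxyz".toList.contains (PySem.Chars.lowerChar c))).length
  (String.ofList rev, (cnt : Int))

-- ===== PORT B =====
def reverse_and_count_consonants_alt (s : String) : String × Int :=
  let rev := (PySem.Str.slice? s none none (-1)).getD ""   -- s[::-1]; step ≠ 0 so never none
  let cnt := rev.toList.foldl
    (fun acc c => if "bcdfghjklmnpqrstvwxyz".toList.contains (PySem.Chars.lowerChar c)
                  then acc + 1 else acc) (0 : Int)         -- sum(1 for c in rev if …)
  (rev, cnt)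

-- ===== PRECONDITION & SPEC =====
def Spec_reverse_and_count_consonants (s : String) (out : String × Int) : Prop := out = reverse_and_count_consonants_alt s
instance (s : String) (out : String × Int) : Decidable (Spec_reverse_and_count_consonants s out) := by unfold Spec_reverse_and_count_consonants; infer_instance

-- ===== CLAIM (what is proved, stated in full; the proofs are below) =====
def Claim_equal_reverse_and_count_consonants : Prop := ∀ (s : String), Dom_reverse_and_count_consonants s → Spec_reverse_and_count_consonants s (reverse_and_count_consonants s)

-- ===== LEMMAS AND PROOFS =====
theorem pvDrain_eq (stack reverse : List Char) :
    pvDrain stack reverse = reverse ++ stack.reverse := by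
  induction stack using List.reverseRecOn generalizing reverse with
  | nil => simp [pvDrain]
  | append_singleton xs x ih =>
    rw [pvDrain]
    simp [ih]

-- ===== VERDICT (by name: the statement is the Claim_ definition above) =====
theorem reverse_and_count_consonants_spec : Claim_equal_reverse_and_count_consonants := by
  intro s _
  show _ = _
  simp only [reverse_and_count_consonants, reverse_and_count_consonants_alt,
    PySem.Str.slice?_none_none_neg_one, Option.getD_some,
    PySem.List.foldl_append_singleton_eq_map, List.map_id', List.nil_append,
    pvDrain_eq, PySem.List.foldl_if_add_one]
  rw [Prod.mk.injEq]
  refine ⟨rfl, ?_⟩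
  simp [List.countP_eq_length_filter]
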